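-- pv_equiv track=rewrite | github.com/jiji-svg/coding_test | level0/day5/coffee_errand.py | solution
-- ===== SOURCE A (Python) =====
-- def solution(order):
--     answer = 0
--     for coffee in order:
--         if coffee.count('americano') or coffee.count('anything'):
--             answer += 4500
--         else:
--             answer += 5000
--     return answer
-- ===== SOURCE B (Python) =====
-- def solution(order):
--     if not order:
--         return 0
--     if len(order) == 1:
--         c = order[0]
--         return 4500 if c.find('americano') != -1 or c.find('anything') != -1 else 5000
--     mid = len(order) // 2
--     return solution(order[:mid]) + solution(order[mid:])
-- ===== Notes on version B (the rewrite author's own statement) =====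
-- stated objective: alternative
-- what changed: Replaces the single left-to-right accumulating loop by a divide-and-conquer recursion that splits the order list in half, prices a singleton leaf directly (using str.find != -1 instead of .count truthiness), and sums the two halves; correct because the total price is the sum of per-item prices, which is associative under any split.
import Mathlib
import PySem

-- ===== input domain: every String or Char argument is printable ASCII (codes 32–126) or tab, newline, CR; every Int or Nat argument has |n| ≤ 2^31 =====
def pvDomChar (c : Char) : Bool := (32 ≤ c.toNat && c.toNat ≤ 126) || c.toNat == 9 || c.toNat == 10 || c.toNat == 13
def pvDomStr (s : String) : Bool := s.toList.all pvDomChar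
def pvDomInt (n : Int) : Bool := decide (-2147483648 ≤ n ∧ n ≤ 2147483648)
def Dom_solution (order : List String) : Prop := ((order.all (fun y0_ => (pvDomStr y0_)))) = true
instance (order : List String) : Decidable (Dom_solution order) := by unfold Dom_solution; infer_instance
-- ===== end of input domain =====

-- B replaces A's accumulating loop by a divide-and-conquer recursion: split the
-- list in half, price a singleton leaf directly (via find != -1), sum the halves
-- (objective: alternative decomposition, same total cost up to slicing overhead).

-- ===== PORT A =====
def solution (order : List String) : Int :=
  order.foldl
    (fun answer coffee =>
      if PySem.Str.count coffee "americano" ≠ 0 ∨ PySem.Str.count coffee "anything" ≠ 0 then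
        answer + 4500
      else
        answer + 5000)
    0

-- ===== PORT B =====
-- order[:mid] / order[mid:] are List.take mid / List.drop mid (mid a Nat, 0 ≤ mid ≤ len: exact).
def solution_alt : List String → Int
  | [] => 0
  | c :: t =>
    if (c :: t).length = 1 then
      if PySem.Str.find c "americano" ≠ -1 ∨ PySem.Str.find c "anything" ≠ -1 then 4500 else 5000
    else
      solution_alt ((c :: t).take ((c :: t).length / 2)) +
        solution_alt ((c :: t).drop ((c :: t).length / 2))
termination_by l => l.length
decreasing_by
  · simp only [List.length_take, List.length_cons]; omega
  · rename_i h
    simp only [List.length_drop, List.length_cons]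
    simp only [List.length_cons] at h
    omega

-- ===== PRECONDITION & SPEC =====
def Spec_solution (order : List String) (out : Int) : Prop := out = solution_alt order
instance (order : List String) (out : Int) : Decidable (Spec_solution order out) := by unfold Spec_solution; infer_instance

-- ===== CLAIM (what is proved, stated in full; the proofs are below) =====
def Claim_equal_solution : Prop := ∀ (order : List String), Dom_solution order → Spec_solution order (solution order)

-- ===== LEMMAS AND PROOFS =====

def pvPrice (c : String) : Int :=
  if "americano".toList <:+: c.toList ∨ "anything".toList <:+: c.toList then 4500 else 5000

theorem count_go_le (sub : List Char) :
    ∀ (fuel : Nat) (l : List Char) (acc : Nat), acc ≤ PySem.Chars.count.go sub fuel l acc := by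
  intro fuel
  induction fuel with
  | zero => intro l acc; cases l <;> simp [PySem.Chars.count.go]
  | succ n ih =>
    intro l acc
    cases l with
    | nil => simp [PySem.Chars.count.go]
    | cons h t =>
      simp only [PySem.Chars.count.go]
      split
      · exact le_trans (Nat.le_succ acc) (ih _ _)
      · exact ih _ _

theorem count_go_eq_acc_iff (sub : List Char) (hsub : sub ≠ []) :
    ∀ (fuel : Nat) (l : List Char) (acc : Nat), l.length ≤ fuel →
      (PySem.Chars.count.go sub fuel l acc = acc ↔ ¬ sub <:+: l) := by
  intro fuel
  induction fuel with
  | zero =>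
    intro l acc hl
    have : l = [] := List.length_eq_zero_iff.mp (Nat.le_zero.mp hl)
    subst this
    simp [PySem.Chars.count.go, List.infix_nil, hsub]
  | succ n ih =>
    intro l acc hl
    cases l with
    | nil =>
      simp [PySem.Chars.count.go, List.infix_nil, hsub]
    | cons h t =>
      simp only [PySem.Chars.count.go]
      rw [List.infix_cons_iff]
      split
      · rename_i hpre
        constructor
        · intro heq
          exfalso
          have hle := count_go_le sub n (List.drop sub.length (h :: t)) (acc + 1)
          omega
        · intro hno
          exact absurd (Or.inl ((PySem.Chars.startswith_iff _ _).mp hpre)) hno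
      · rename_i hpre
        have hlen : t.length ≤ n := by simpa using hl
        rw [ih t acc hlen]
        constructor
        · intro hn hcon
          rcases hcon with hp | hi
          · exact hpre ((PySem.Chars.startswith_iff _ _).mpr hp)
          · exact hn hi
        · intro hn hi
          exact hn (Or.inr hi)

theorem count_ne_zero_iff_infix (c : String) (sub : String) (hsub : sub.toList ≠ []) :
    (PySem.Str.count c sub ≠ 0) ↔ sub.toList <:+: c.toList := by
  simp only [PySem.Str.count, PySem.Chars.count, List.isEmpty_iff]
  rw [if_neg hsub]
  rw [← not_iff_comm.mp (Iff.symm (count_go_eq_acc_iff sub.toList hsub c.toList.length c.toList 0 (le_refl _)))]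

theorem solution_foldl_eq (t : List String) : ∀ (a : Int),
    t.foldl
      (fun answer coffee =>
        if PySem.Str.count coffee "americano" ≠ 0 ∨ PySem.Str.count coffee "anything" ≠ 0 then
          answer + 4500
        else
          answer + 5000)
      a = a + (t.map pvPrice).sum := by
  induction t with
  | nil => intro a; simp
  | cons h t ih =>
    intro a
    simp only [List.foldl_cons, List.map_cons, List.sum_cons]
    by_cases hc : "americano".toList <:+: h.toList ∨ "anything".toList <:+: h.toList
    · rw [if_pos, ih, pvPrice, if_pos hc]; · ring
      · rw [count_ne_zero_iff_infix h "americano" (by decide),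
            count_ne_zero_iff_infix h "anything" (by decide)]
        exact hc
    · rw [if_neg, ih, pvPrice, if_neg hc]; · ring
      · rw [count_ne_zero_iff_infix h "americano" (by decide),
            count_ne_zero_iff_infix h "anything" (by decide)]
        exact hc

theorem solution_eq_sum (order : List String) :
    solution order = (order.map pvPrice).sum := by
  unfold solution
  rw [solution_foldl_eq]
  ring

theorem solution_alt_eq_sum_aux : ∀ (n : Nat) (order : List String), order.length ≤ n →
    solution_alt order = (order.map pvPrice).sum := by
  intro n
  induction n with
  | zero =>
    intro order hlen
    have : order = [] := List.length_eq_zero_iff.mp (Nat.le_zero.mp hlen)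
    subst this; simp [solution_alt]
  | succ n ih =>
    intro order hlen
    cases order with
    | nil => simp [solution_alt]
    | cons c t =>
      by_cases h : (c :: t).length = 1
      · rw [solution_alt, if_pos h]
        have : t = [] := by simp only [List.length_cons] at h; simpa using h
        subst this
        simp only [List.map_cons, List.map_nil, List.sum_cons, List.sum_nil, add_zero]
        have hiff : (PySem.Str.find c "americano" ≠ -1 ∨ PySem.Str.find c "anything" ≠ -1) ↔
            ("americano".toList <:+: c.toList ∨ "anything".toList <:+: c.toList) := by
          rw [PySem.Str.find_ne_neg_one_iff, PySem.Str.find_ne_neg_one_iff]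
        by_cases hc : "americano".toList <:+: c.toList ∨ "anything".toList <:+: c.toList
        · rw [if_pos (hiff.mpr hc), pvPrice, if_pos hc]
        · rw [if_neg (fun hx => hc (hiff.mp hx)), pvPrice, if_neg hc]
      · rw [solution_alt, if_neg h]
        have hlen2 : 2 ≤ (c :: t).length := by
          simp only [List.length_cons] at h ⊢; omega
        have htake : ((c :: t).take ((c :: t).length / 2)).length ≤ n := by
          simp only [List.length_take]; simp only [List.length_cons] at hlen ⊢; omega
        have hdrop : ((c :: t).drop ((c :: t).length / 2)).length ≤ n := by
          simp only [List.length_drop]; simp only [List.length_cons] at hlen hlen2 ⊢; omega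
        rw [ih _ htake, ih _ hdrop,
            ← List.sum_append, ← List.map_append, List.take_append_drop]

-- ===== VERDICT (by name: the statement is the Claim_ definition above) =====
theorem solution_spec : Claim_equal_solution := by
  intro order _
  unfold Spec_solution
  rw [solution_eq_sum, solution_alt_eq_sum_aux order.length order (le_refl _)]
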